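-- pv_equiv track=rewrite | github.com/pisunkakaskin2-coder/Kallbot | bot.py | search
-- ===== SOURCE A (Python) =====
-- SEARCH_MODE_EXACT = "exact"
--
-- def normalize_site(raw_site: str):
--     s = raw_site.strip()
--
--     if s.startswith("https://"):
--         s = s[8:]
--     elif s.startswith("http://"):
--         s = s[7:]
--
--     for suffix in ("/register(login)", "/register", "/login"):
--         if s.endswith(suffix):
--             s = s[: -len(suffix)]
--             break
--
--     return s.strip("/")
--
-- def parse_line(line: str):
--     parts = line.rsplit(":", 2)
--
--     if len(parts) == 3:
--         raw_site, nick, other = parts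
--         return normalize_site(raw_site), nick.strip(), other.strip()
--
--     if len(parts) == 2:
--         nick, other = parts
--         return "", nick.strip(), other.strip()
--
--     return "", "", ""
--
-- def extract_nick(line: str):
--     _, nick, _ = parse_line(line)
--     return nick
--
-- def extract_site(line: str):
--     site, _, _ = parse_line(line)
--     return site
--
-- def format_line(line: str):
--     site, nick, other = parse_line(line)
--
--     if site:
--         return f"{site}:{nick}:{other}"
--     return f"{nick}:{other}"
--
-- def filter_lines_by_site(lines, site_filter: str):
--     if not site_filter:
--         return lines
--
--     s = site_filter.strip().lower()
--     result = []
--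
--     for line in lines:
--         site = extract_site(line).lower()
--         if s in site:
--             result.append(line)
--
--     return result
--
-- def search(lines, query, mode, site_filter=""):
--     filtered = filter_lines_by_site(lines, site_filter)
--     q = query.lower()
--     result = []
--
--     for line in filtered:
--         nick = extract_nick(line).lower()
--
--         if mode == SEARCH_MODE_EXACT:
--             if nick == q:
--                 result.append(format_line(line))
--         else:
--             if q in nick:
--                 result.append(format_line(line))
--
--     return result
-- ===== SOURCE B (Python) =====
-- SEARCH_MODE_EXACT = "exact"
--
-- _SUFFIXES = ("/register(login)", "/register", "/login")
--
--
-- def _parse(line):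
--     # parse once: (site, nick, other), site already normalized
--     parts = line.rsplit(":", 2)
--     if len(parts) == 2:
--         nick, other = parts
--         return "", nick.strip(), other.strip()
--     if len(parts) == 3:
--         raw, nick, other = parts
--         s = raw.strip()
--         if s.startswith("https://"):
--             s = s[8:]
--         elif s.startswith("http://"):
--             s = s[7:]
--         suf = next((p for p in _SUFFIXES if s.endswith(p)), None)
--         if suf is not None:
--             s = s[: len(s) - len(suf)]
--         return s.strip("/"), nick.strip(), other.strip()
--     return "", "", ""
--
--
-- def search(lines, query, mode, site_filter=""):
--     sf = site_filter.strip().lower()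
--     q = query.lower()
--     exact = mode == SEARCH_MODE_EXACT
--     out = []
--     for line in lines:
--         site, nick, other = _parse(line)
--         if site_filter and sf not in site.lower():
--             continue
--         n = nick.lower()
--         if (n == q) if exact else (q in n):
--             out.append(f"{site}:{nick}:{other}" if site else f"{nick}:{other}")
--     return out
-- ===== Notes on version B (the rewrite author's own statement) =====
-- stated objective: simpler
-- what changed: B replaces A's two-phase pipeline (filter lines by site, then re-parse each surviving line twice more via extract_nick and format_line) with a single pass that parses each line exactly once and formats the match inline from the parsed parts.
import Mathlib
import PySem

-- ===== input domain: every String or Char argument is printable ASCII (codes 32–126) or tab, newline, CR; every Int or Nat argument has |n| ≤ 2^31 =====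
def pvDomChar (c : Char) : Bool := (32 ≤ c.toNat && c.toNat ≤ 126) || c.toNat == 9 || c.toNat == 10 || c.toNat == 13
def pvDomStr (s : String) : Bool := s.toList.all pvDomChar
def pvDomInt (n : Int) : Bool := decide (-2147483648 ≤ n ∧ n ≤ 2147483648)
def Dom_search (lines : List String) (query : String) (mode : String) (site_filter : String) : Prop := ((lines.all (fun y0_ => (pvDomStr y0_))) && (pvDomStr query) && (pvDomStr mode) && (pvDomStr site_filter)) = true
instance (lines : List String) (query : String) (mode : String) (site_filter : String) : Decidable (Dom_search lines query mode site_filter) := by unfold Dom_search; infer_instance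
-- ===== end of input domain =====

-- B makes ONE pass over `lines`, parsing each line ONCE and formatting inline, where A
-- filters by site first and re-parses every surviving line twice more (objective: simpler one-pass decomposition).

-- ===== PORT A =====
-- hand port of str.rsplit(":", 2) (no PySem primitive): split off the last colon, if any
def splitLastColon : List Char → Option (List Char × List Char)
  | [] => none
  | c :: rest =>
    match splitLastColon rest with
    | some (l, r) => some (c :: l, r)
    | none => if c = ':' then some ([], rest) else none

-- exact: line.rsplit(":", 2) = split at the last two ':' characters (at most)
def rsplitColon2 (s : List Char) : List (List Char) :=
  match splitLastColon s with
  | none => [s]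
  | some (l1, r1) =>
    match splitLastColon l1 with
    | none => [l1, r1]
    | some (l2, m) => [l2, m, r1]

-- the `for suffix in (…): if s.endswith(suffix): s = s[:-len(suffix)]; break` loop
def trySuffA : List (List Char) → List Char → List Char
  | [], s => s
  | suf :: rest, s =>
    if PySem.Chars.endswith s suf then PySem.List.slice s none (some (-(suf.length : Int)))
    else trySuffA rest s

def normalizeSite (rawSite : List Char) : List Char :=
  let s := PySem.Chars.strip rawSite
  let s := if PySem.Chars.startswith s "https://".toList then PySem.List.slice s (some 8) none
           else if PySem.Chars.startswith s "http://".toList then PySem.List.slice s (some 7) none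
           else s
  let s := trySuffA ["/register(login)".toList, "/register".toList, "/login".toList] s
  PySem.Chars.stripChars s "/".toList

def parseLine (line : String) : List Char × List Char × List Char :=
  match rsplitColon2 line.toList with
  | [rawSite, nick, other] => (normalizeSite rawSite, PySem.Chars.strip nick, PySem.Chars.strip other)
  | [nick, other] => ([], PySem.Chars.strip nick, PySem.Chars.strip other)
  | _ => ([], [], [])

def extractNick (line : String) : List Char := (parseLine line).2.1

def extractSite (line : String) : List Char := (parseLine line).1

def formatLine (line : String) : String :=
  let p := parseLine line
  if p.1 ≠ [] then String.ofList (p.1 ++ ':' :: (p.2.1 ++ ':' :: p.2.2))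
  else String.ofList (p.2.1 ++ ':' :: p.2.2)

def filterLinesBySite (lines : List String) (site_filter : String) : List String :=
  if site_filter = "" then lines
  else
    let s := PySem.Chars.lower (PySem.Chars.strip site_filter.toList)
    lines.foldl (fun result line =>
      if PySem.Chars.isIn s (PySem.Chars.lower (extractSite line)) then result ++ [line]
      else result) []

def search (lines : List String) (query : String) (mode : String) (site_filter : String) : List String :=
  let filtered := filterLinesBySite lines site_filter
  let q := PySem.Chars.lower query.toList
  filtered.foldl (fun result line =>
    let nick := PySem.Chars.lower (extractNick line)
    if mode = "exact" then
      if nick = q then result ++ [formatLine line] else result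
    else
      if PySem.Chars.isIn q nick then result ++ [formatLine line] else result) []

-- ===== PORT B =====
-- parse once: (site, nick, other) with the site already normalized
def parseB (line : String) : List Char × List Char × List Char :=
  match rsplitColon2 line.toList with
  | [nick, other] => ([], PySem.Chars.strip nick, PySem.Chars.strip other)
  | [raw, nick, other] =>
    let s := PySem.Chars.strip raw
    let s := if PySem.Chars.startswith s "https://".toList then PySem.List.slice s (some 8) none
             else if PySem.Chars.startswith s "http://".toList then PySem.List.slice s (some 7) none
             else s
    let s := match (["/register(login)".toList, "/register".toList, "/login".toList]).find?
                 (fun p => PySem.Chars.endswith s p) with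
             | some suf => PySem.List.slice s none (some ((s.length : Int) - (suf.length : Int)))
             | none => s
    (PySem.Chars.stripChars s "/".toList, PySem.Chars.strip nick, PySem.Chars.strip other)
  | _ => ([], [], [])

def search_alt (lines : List String) (query : String) (mode : String) (site_filter : String) : List String :=
  let sf := PySem.Chars.lower (PySem.Chars.strip site_filter.toList)
  let q := PySem.Chars.lower query.toList
  lines.foldl (fun out line =>
    let p := parseB line
    if site_filter ≠ "" ∧ ¬ (PySem.Chars.isIn sf (PySem.Chars.lower p.1)) then out
    else
      let n := PySem.Chars.lower p.2.1
      if (if mode = "exact" then n = q else PySem.Chars.isIn q n = true) then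
        out ++ [if p.1 ≠ [] then String.ofList (p.1 ++ ':' :: (p.2.1 ++ ':' :: p.2.2))
                else String.ofList (p.2.1 ++ ':' :: p.2.2)]
      else out) []

-- ===== PRECONDITION & SPEC =====
def Spec_search (lines : List String) (query : String) (mode : String) (site_filter : String) (out : List String) : Prop := out = search_alt lines query mode site_filter
instance (lines : List String) (query : String) (mode : String) (site_filter : String) (out : List String) : Decidable (Spec_search lines query mode site_filter out) := by unfold Spec_search; infer_instance

-- ===== CLAIM (what is proved, stated in full; the proofs are below) =====
def Claim_equal_search : Prop := ∀ (lines : List String) (query : String) (mode : String) (site_filter : String), Dom_search lines query mode site_filter → Spec_search lines query mode site_filter (search lines query mode site_filter)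

-- ===== LEMMAS AND PROOFS =====

-- the two nick/site tests and the formatter, as Bool predicates on a line
def pvNickP (q : List Char) (mode : String) (line : String) : Bool :=
  if mode = "exact" then PySem.Chars.lower (extractNick line) == q
  else PySem.Chars.isIn q (PySem.Chars.lower (extractNick line))

def pvSiteP (sf : List Char) (line : String) : Bool :=
  PySem.Chars.isIn sf (PySem.Chars.lower (extractSite line))

-- B's `next(p for p in SUFFIXES if s.endswith(p))` + slice equals A's for-with-break
theorem findSuffix_eq (s : List Char) (sufs : List (List Char)) (h : ∀ suf ∈ sufs, suf ≠ []) :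
    (match sufs.find? (fun p => PySem.Chars.endswith s p) with
     | some suf => PySem.List.slice s none (some ((s.length : Int) - (suf.length : Int)))
     | none => s) = trySuffA sufs s := by
  induction sufs with
  | nil => simp [trySuffA]
  | cons suf rest ih =>
    by_cases hend : PySem.Chars.endswith s suf = true
    · have hsfx : suf <:+ s := (PySem.Chars.endswith_iff s suf).mp hend
      have hle : suf.length ≤ s.length := List.IsSuffix.length_le hsfx
      have hpos : 0 < suf.length := List.length_pos_iff.mpr (h suf (by simp))
      rw [List.find?_cons_of_pos hend]
      simp only [trySuffA, if_pos hend]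
      rw [PySem.List.slice_to_neg_natCast s suf.length hpos]
      have hcast : ((s.length : Int) - (suf.length : Int)) = ((s.length - suf.length : Nat) : Int) := by
        omega
      rw [hcast, PySem.List.slice_to_natCast]
    · rw [List.find?_cons_of_neg (by simpa using hend)]
      simp only [trySuffA, if_neg hend]
      exact ih (fun p hp => h p (List.mem_cons_of_mem _ hp))

theorem parseB_eq (line : String) : parseB line = parseLine line := by
  unfold parseB parseLine
  rcases h : rsplitColon2 line.toList with _ | ⟨a, _ | ⟨b, _ | ⟨c, _ | ⟨d, rest⟩⟩⟩⟩ <;>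
    simp only [h]
  unfold normalizeSite
  simp only []
  rw [findSuffix_eq _ _ (by decide)]

theorem filterA_eq (lines : List String) (site_filter : String) (hsf : ¬ site_filter = "") :
    filterLinesBySite lines site_filter
      = lines.filter (pvSiteP (PySem.Chars.lower (PySem.Chars.strip site_filter.toList))) := by
  unfold filterLinesBySite
  rw [if_neg hsf]
  exact (PySem.List.foldl_append_if_eq_filter
    (pvSiteP (PySem.Chars.lower (PySem.Chars.strip site_filter.toList))) lines []).trans (by simp)

theorem searchA_eq (lines : List String) (query mode site_filter : String) :
    search lines query mode site_filter
      = ((filterLinesBySite lines site_filter).filter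
            (pvNickP (PySem.Chars.lower query.toList) mode)).map formatLine := by
  unfold search
  rw [PySem.List.foldl_congr_mem' (filterLinesBySite lines site_filter) _
      (fun result line => if pvNickP (PySem.Chars.lower query.toList) mode line = true
                          then result ++ [formatLine line] else result) []
      (fun line _ result => by
        by_cases hm : mode = "exact"
        · by_cases hc : PySem.Chars.lower (extractNick line) = PySem.Chars.lower query.toList <;>
            simp [pvNickP, hm, hc]
        · by_cases hc : PySem.Chars.isIn (PySem.Chars.lower query.toList)
              (PySem.Chars.lower (extractNick line)) = true <;>
            simp [pvNickP, hm, hc])]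
  exact (PySem.List.foldl_append_if (pvNickP (PySem.Chars.lower query.toList) mode)
    formatLine (filterLinesBySite lines site_filter) []).trans (by simp)

theorem searchB_eq (lines : List String) (query mode site_filter : String) :
    search_alt lines query mode site_filter
      = (lines.filter (fun line =>
            (decide (site_filter = "")
              || pvSiteP (PySem.Chars.lower (PySem.Chars.strip site_filter.toList)) line)
            && pvNickP (PySem.Chars.lower query.toList) mode line)).map formatLine := by
  unfold search_alt
  rw [PySem.List.foldl_congr_mem' lines _
      (fun out line => if ((decide (site_filter = "")
              || pvSiteP (PySem.Chars.lower (PySem.Chars.strip site_filter.toList)) line)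
            && pvNickP (PySem.Chars.lower query.toList) mode line) = true
          then out ++ [formatLine line] else out) []
      (fun line _ out => by
        simp only [parseB_eq]
        by_cases hsf : site_filter = "" <;>
          by_cases hs : pvSiteP (PySem.Chars.lower (PySem.Chars.strip site_filter.toList)) line = true <;>
          by_cases hm : mode = "exact" <;>
          simp [pvSiteP, pvNickP, extractSite, extractNick, formatLine, hsf, hs, hm] <;>
          split_ifs <;> simp_all)]
  exact (PySem.List.foldl_append_if _ formatLine lines []).trans (by simp)

-- ===== VERDICT (by name: the statement is the Claim_ definition above) =====
theorem search_spec : Claim_equal_search := by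
  unfold Claim_equal_search Spec_search
  intro lines query mode site_filter _
  rw [searchA_eq, searchB_eq]
  by_cases hsf : site_filter = ""
  · simp [filterLinesBySite, hsf]
  · rw [filterA_eq lines site_filter hsf, List.filter_filter]
    congr 1
    apply List.filter_congr
    intro line _
    simp [hsf, Bool.and_comm]
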